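-- pv_equiv track=rewrite | github.com/isaiascabreraa/TeoriaDeAlgoritmos-FIUBA | Greedy/11_bolsas_del_supermercado.py | distribuir_en_bolsas
-- ===== SOURCE A (Python) =====
-- def distribuir_en_bolsas(capacidad, productos):
--     if capacidad <= 0 or not productos:
--         return []
--
--     bolsas = []
--     productos_usados = set()
--     productos.sort(reverse=True) 					#O(nlog(n))
--
--     for i in range(len(productos)): 				#O(n)
--         if i in productos_usados: 					#O(1)
--             continue
--
--         bolsa = []
--         capacidad_actual = capacidad
--
--         for j in range(i, len(productos)): 			#O(n)
--
--             if j not in productos_usados and productos[j] <= capacidad_actual: #O(1)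
--
--                 bolsa.append(productos[j])			#O(1)
--                 capacidad_actual -= productos[j]	#O(1)
--                 productos_usados.add(j) 			#O(1)
--
--         bolsas.append(bolsa) 						#O(1)
--
--     return bolsas
-- ===== SOURCE B (Python) =====
-- def distribuir_en_bolsas(capacidad, productos):
--     if capacidad <= 0 or not productos:
--         return []
--     productos.sort(reverse=True)
--     bolsas = []
--     restantes = productos
--     while restantes:
--         cabeza = restantes[0]
--         bolsa = []
--         resto = []
--         cap = capacidad
--         for p in restantes:
--             if p <= cap:
--                 bolsa.append(p)
--                 cap -= p
--             else:
--                 resto.append(p)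
--         bolsas.append(bolsa)
--         # the bag was opened at the head item; if it did not fit it is retired
--         restantes = resto[1:] if cabeza > capacidad else resto
--     return bolsas
-- ===== Notes on version B (the rewrite author's own statement) =====
-- stated objective: faster
-- what changed: A scans all n indices for every bag and tracks a used-index set; B repeatedly partitions the list of still-unpacked items in one pass per bag, so each pass touches only the remaining items and the index bookkeeping disappears.
import Mathlib
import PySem

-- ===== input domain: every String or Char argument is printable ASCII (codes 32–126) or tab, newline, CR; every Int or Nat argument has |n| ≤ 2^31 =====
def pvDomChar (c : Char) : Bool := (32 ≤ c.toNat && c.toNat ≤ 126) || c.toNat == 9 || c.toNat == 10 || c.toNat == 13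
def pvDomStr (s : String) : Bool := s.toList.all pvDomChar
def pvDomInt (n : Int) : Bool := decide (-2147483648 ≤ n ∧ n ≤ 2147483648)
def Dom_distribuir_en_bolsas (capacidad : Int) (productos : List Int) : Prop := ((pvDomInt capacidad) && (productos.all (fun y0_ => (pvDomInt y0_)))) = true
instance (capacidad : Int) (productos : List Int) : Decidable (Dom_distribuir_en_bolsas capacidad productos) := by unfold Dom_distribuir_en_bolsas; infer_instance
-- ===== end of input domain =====

-- B replaces A's index/used-set double scan by repeated partition passes over the list of still-unpacked
-- items only (measured faster; same return value). Both A and Source B sort `productos` in place (same mutation);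
-- the equivalence proved here is about the return value.

-- ===== PORT A =====
-- inner loop 'for j in range(i, len(productos)): …' of A, over the index list js, state (bolsa, capacidad_actual, productos_usados)
def pvAInner (ps : List Int) (js : List Int) (bolsa : List Int) (cap : Int)
    (usados : PySem.Set Int) : List Int × PySem.Set Int :=
  match js with
  | [] => (bolsa, usados)
  | j :: rest =>
    if ¬ (PySem.Set.contains usados j = true) ∧ PySem.List.pyGetD ps j 0 ≤ cap then
      pvAInner ps rest (bolsa ++ [PySem.List.pyGetD ps j 0]) (cap - PySem.List.pyGetD ps j 0)
        (PySem.Set.add usados j)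
    else
      pvAInner ps rest bolsa cap usados

-- outer loop 'for i in range(len(productos)): …' of A, state (bolsas, productos_usados)
def pvAOuter (capacidad : Int) (ps : List Int) (n : Int) (is : List Int)
    (bolsas : List (List Int)) (usados : PySem.Set Int) : List (List Int) :=
  match is with
  | [] => bolsas
  | i :: rest =>
    if PySem.Set.contains usados i = true then
      pvAOuter capacidad ps n rest bolsas usados
    else
      let r := pvAInner ps (PySem.List.pyRange i n 1) [] capacidad usados
      pvAOuter capacidad ps n rest (bolsas ++ [r.1]) r.2

def distribuir_en_bolsas (capacidad : Int) (productos : List Int) : List (List Int) :=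
  if capacidad ≤ 0 ∨ productos = [] then []
  else
    let ps := PySem.List.sorted productos (fun x => x) true
    pvAOuter capacidad ps (ps.length : Int) (PySem.List.pyRange 0 (ps.length : Int) 1) [] PySem.Set.empty

-- ===== PORT B =====
-- one pass 'for p in restantes: …' of Source B, state (bolsa, resto, cap)
def pvBPass (items : List Int) (bolsa : List Int) (resto : List Int) (cap : Int) :
    List Int × List Int :=
  match items with
  | [] => (bolsa, resto)
  | p :: rest =>
    if p ≤ cap then pvBPass rest (bolsa ++ [p]) resto (cap - p)
    else pvBPass rest bolsa (resto ++ [p]) cap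

-- the resto of a pass is never longer than its input (used only for termination of pvBLoop)
theorem pvBPass_resto_len_le : ∀ (items bolsa resto : List Int) (cap : Int),
    ((pvBPass items bolsa resto cap).2).length ≤ resto.length + items.length := by
  intro items
  induction items with
  | nil => intro bolsa resto cap; simp [pvBPass]
  | cons p rest ih =>
    intro bolsa resto cap
    simp only [pvBPass]
    split
    · have := ih (bolsa ++ [p]) resto (cap - p)
      simp only [List.length_cons] at *; omega
    · have := ih bolsa (resto ++ [p]) cap
      simp only [List.length_cons, List.length_append, List.length_nil] at *; omega

-- 'while restantes: …' of Source B, state (restantes, bolsas)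
def pvBLoop (capacidad : Int) (restantes : List Int) (bolsas : List (List Int)) :
    List (List Int) :=
  match h : restantes with
  | [] => bolsas
  | cabeza :: t =>
    let r := pvBPass restantes [] [] capacidad
    pvBLoop capacidad (if cabeza > capacidad then r.2.drop 1 else r.2) (bolsas ++ [r.1])
  termination_by restantes.length
  decreasing_by
  · subst h
    have h3 := pvBPass_resto_len_le t [cabeza] [] (capacidad - cabeza)
    have h4 := pvBPass_resto_len_le t [] [cabeza] capacidad
    simp only [pvBPass, List.nil_append, List.length_cons, List.length_nil] at h3 h4 ⊢
    split <;> split <;> (try simp only [List.length_drop]) <;> omega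

def distribuir_en_bolsas_alt (capacidad : Int) (productos : List Int) : List (List Int) :=
  if capacidad ≤ 0 ∨ productos = [] then []
  else
    let ps := PySem.List.sorted productos (fun x => x) true
    pvBLoop capacidad ps []

-- ===== PRECONDITION & SPEC =====
def Spec_distribuir_en_bolsas (capacidad : Int) (productos : List Int) (out : List (List Int)) : Prop := out = distribuir_en_bolsas_alt capacidad productos
instance (capacidad : Int) (productos : List Int) (out : List (List Int)) : Decidable (Spec_distribuir_en_bolsas capacidad productos out) := by unfold Spec_distribuir_en_bolsas; infer_instance

-- ===== CLAIM (what is proved, stated in full; the proofs are below) =====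
def Claim_equal_distribuir_en_bolsas : Prop := ∀ (capacidad : Int) (productos : List Int), Dom_distribuir_en_bolsas capacidad productos → Spec_distribuir_en_bolsas capacidad productos (distribuir_en_bolsas capacidad productos)

-- ===== LEMMAS AND PROOFS =====

-- proof-side model of one greedy pass on (index, value) pairs
def pvGreedyE (cap : Int) : List (Int × Int) → List (Int × Int) × List (Int × Int)
  | [] => ([], [])
  | q :: t =>
    if q.2 ≤ cap then
      let r := pvGreedyE (cap - q.2) t
      (q :: r.1, r.2)
    else
      let r := pvGreedyE cap t
      (r.1, q :: r.2)

-- pairs of l whose index is not yet used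
def pvFilt (u : List Int) (l : List (Int × Int)) : List (Int × Int) :=
  l.filter (fun q => !(decide (q.1 ∈ u)))

theorem pvBLoop_nil (capacidad : Int) (bolsas : List (List Int)) :
    pvBLoop capacidad [] bolsas = bolsas := by
  simp [pvBLoop]

theorem pvBLoop_cons (capacidad cabeza : Int) (t : List Int) (bolsas : List (List Int)) :
    pvBLoop capacidad (cabeza :: t) bolsas =
      pvBLoop capacidad
        (if cabeza > capacidad then ((pvBPass (cabeza :: t) [] [] capacidad).2).drop 1
         else (pvBPass (cabeza :: t) [] [] capacidad).2)
        (bolsas ++ [(pvBPass (cabeza :: t) [] [] capacidad).1]) := by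
  rw [pvBLoop]

theorem pvBPass_eq_greedyE : ∀ (l : List (Int × Int)) (bolsa resto : List Int) (cap : Int),
    pvBPass (l.map Prod.snd) bolsa resto cap
      = (bolsa ++ (pvGreedyE cap l).1.map Prod.snd, resto ++ (pvGreedyE cap l).2.map Prod.snd) := by
  intro l
  induction l with
  | nil => intro bolsa resto cap; simp [pvBPass, pvGreedyE]
  | cons q t ih =>
    intro bolsa resto cap
    simp only [List.map_cons, pvBPass, pvGreedyE]
    by_cases h : q.2 ≤ cap
    · simp only [if_pos h, ih]; simp
    · simp only [if_neg h, ih]; simp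

theorem pvGreedyE_taken_sublist : ∀ (cap : Int) (l : List (Int × Int)),
    (pvGreedyE cap l).1.Sublist l := by
  intro cap l
  induction l generalizing cap with
  | nil => simp [pvGreedyE]
  | cons q t ih =>
    simp only [pvGreedyE]
    by_cases h : q.2 ≤ cap
    · simpa [if_pos h] using (ih (cap - q.2)).cons₂ q
    · simpa [if_neg h] using (ih cap).cons q

theorem pvGreedyE_untaken : ∀ (cap : Int) (l : List (Int × Int)),
    (l.map Prod.fst).Nodup →
    (pvGreedyE cap l).2
      = l.filter (fun q => !(decide (q.1 ∈ (pvGreedyE cap l).1.map Prod.fst))) := by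
  intro cap l
  induction l generalizing cap with
  | nil => simp [pvGreedyE]
  | cons q t ih =>
    intro hnd
    simp only [List.map_cons, List.nodup_cons] at hnd
    obtain ⟨hq, hnd⟩ := hnd
    simp only [pvGreedyE]
    by_cases h : q.2 ≤ cap
    · simp only [if_pos h, List.map_cons, List.filter_cons, List.mem_cons, true_or,
        decide_true, Bool.not_true, Bool.false_eq_true, if_false]
      rw [ih (cap - q.2) hnd]
      apply List.filter_congr
      intro x hx
      have hx1 : x.1 ∈ t.map Prod.fst := List.mem_map_of_mem hx
      have hne : x.1 ≠ q.1 := fun he => hq (he ▸ hx1)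
      simp [hne]
    · simp only [if_neg h, List.filter_cons]
      have hq' : q.1 ∉ (pvGreedyE cap t).1.map Prod.fst := by
        intro hmem
        exact hq (((pvGreedyE_taken_sublist cap t).map Prod.fst).subset hmem)
      rw [ih cap hnd]
      simp [hq']

theorem pvFilt_nil_left (l : List (Int × Int)) : pvFilt [] l = l := by
  simp [pvFilt]

theorem pvFilt_append (u v : List Int) (l : List (Int × Int)) :
    pvFilt (u ++ v) l = (pvFilt u l).filter (fun q => !(decide (q.1 ∈ v))) := by
  simp only [pvFilt, List.filter_filter]
  apply List.filter_congr
  intro x _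
  by_cases h1 : x.1 ∈ u <;> by_cases h2 : x.1 ∈ v <;> simp [h1, h2]

theorem pvFilt_cons_of_mem (u : List Int) (q : Int × Int) (t : List (Int × Int))
    (h : q.1 ∈ u) : pvFilt u (q :: t) = pvFilt u t := by
  simp [pvFilt, h]

theorem pvFilt_cons_of_not_mem (u : List Int) (q : Int × Int) (t : List (Int × Int))
    (h : q.1 ∉ u) : pvFilt u (q :: t) = q :: pvFilt u t := by
  simp [pvFilt, h]

-- the inner loop of A is one greedy pass over the not-yet-used pairs, and marks exactly the taken indices
theorem pvAInner_eq (ps : List Int) :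
    ∀ (l : List (Int × Int)) (u : PySem.Set Int) (cap : Int) (bolsa : List Int),
    (∀ q ∈ l, PySem.List.pyGetD ps q.1 0 = q.2) → (l.map Prod.fst).Nodup →
    pvAInner ps (l.map Prod.fst) bolsa cap u
      = (bolsa ++ (pvGreedyE cap (pvFilt u l)).1.map Prod.snd,
         u ++ (pvGreedyE cap (pvFilt u l)).1.map Prod.fst) := by
  intro l
  induction l with
  | nil => intro u cap bolsa _ _; simp [pvAInner, pvFilt, pvGreedyE]
  | cons q t ih =>
    intro u cap bolsa hc hnd
    simp only [List.map_cons, List.nodup_cons] at hnd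
    obtain ⟨hq, hnd⟩ := hnd
    have hcq : PySem.List.pyGetD ps q.1 0 = q.2 := hc q (by simp)
    have hct : ∀ x ∈ t, PySem.List.pyGetD ps x.1 0 = x.2 := fun x hx => hc x (by simp [hx])
    simp only [List.map_cons, pvAInner, hcq]
    by_cases hu : (q.1 : Int) ∈ u
    · have : PySem.Set.contains u q.1 = true := by
        simpa using (PySem.Set.contains_iff (s := u) (x := q.1)).mpr hu
      rw [if_neg (by rintro ⟨hnc, _⟩; exact hnc this)]
      rw [pvFilt_cons_of_mem u q t hu]
      exact ih u cap bolsa hct hnd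
    · have hcont : ¬ (PySem.Set.contains u q.1 = true) := by
        intro hcc; exact hu ((PySem.Set.contains_iff (s := u) (x := q.1)).mp hcc)
      rw [pvFilt_cons_of_not_mem u q t hu]
      by_cases hfit : q.2 ≤ cap
      · rw [if_pos ⟨hcont, hfit⟩]
        have hadd : PySem.Set.add u q.1 = u ++ [q.1] := PySem.Set.add_of_not_mem hu
        rw [hadd, ih (u ++ [q.1]) (cap - q.2) (bolsa ++ [q.2]) hct hnd]
        have hfilt : pvFilt (u ++ [q.1]) t = pvFilt u t := by
          rw [pvFilt_append]
          apply List.filter_eq_self.mpr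
          intro x hx
          have hx' : x ∈ t := List.mem_of_mem_filter hx
          have : x.1 ≠ q.1 := fun he => hq (he ▸ List.mem_map_of_mem hx')
          simp [this]
        rw [hfilt]
        simp only [pvGreedyE, if_pos hfit]
        simp
      · rw [if_neg (by rintro ⟨_, hf⟩; exact hfit hf)]
        rw [ih u cap bolsa hct hnd]
        simp only [pvGreedyE, if_neg hfit]

-- the k-th entry of enumerate ps 0 is (k, ps[k])
theorem pvEnum_getElem (ps : List Int) (k : Nat) (h : k < ps.length) :
    (PySem.List.enumerate ps 0)[k]'(by simpa [PySem.List.length_enumerate] using h)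
      = ((k : Int), ps[k]) := by
  have hlen : k < (PySem.List.enumerate ps 0).length := by
    simpa [PySem.List.length_enumerate] using h
  have h1 : ((PySem.List.enumerate ps 0)[k]'hlen).1 = (k : Int) := by
    have t1 : (List.map Prod.fst (PySem.List.enumerate ps 0))[k]'(by simpa using hlen)
        = ((PySem.List.enumerate ps 0)[k]'hlen).1 := List.getElem_map _
    have t2 : (List.map Prod.fst (PySem.List.enumerate ps 0))[k]'(by simpa using hlen)
        = (PySem.List.pyRange 0 (0 + (ps.length : Int)) 1)[k]'(by
            simpa [PySem.List.length_pyRange_one] using h) :=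
      List.getElem_of_eq (PySem.List.map_fst_enumerate ps 0) _
    rw [← t1, t2, PySem.List.getElem_pyRange_one]
    ring
  have h2 : ((PySem.List.enumerate ps 0)[k]'hlen).2 = ps[k] := by
    have t1 : (List.map Prod.snd (PySem.List.enumerate ps 0))[k]'(by simpa using hlen)
        = ((PySem.List.enumerate ps 0)[k]'hlen).2 := List.getElem_map _
    have t2 : (List.map Prod.snd (PySem.List.enumerate ps 0))[k]'(by simpa using hlen)
        = ps[k]'h := List.getElem_of_eq (PySem.List.map_snd_enumerate ps 0) _
    rw [← t1, t2]
  exact Prod.ext h1 h2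

theorem pvEnum_consistent (ps : List Int) :
    ∀ q ∈ PySem.List.enumerate ps 0, PySem.List.pyGetD ps q.1 0 = q.2 := by
  intro q hq
  obtain ⟨k, hk, he⟩ := List.mem_iff_getElem.mp hq
  have hklen : k < ps.length := by simpa [PySem.List.length_enumerate] using hk
  rw [pvEnum_getElem ps k hklen] at he
  subst he
  simp [List.getD_eq_getElem?_getD, hklen]

theorem pvEnum_drop_map_fst (ps : List Int) (i : Nat) (h : i ≤ ps.length) :
    ((PySem.List.enumerate ps 0).drop i).map Prod.fst
      = PySem.List.pyRange (i : Int) (ps.length : Int) 1 := by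
  rw [List.map_drop, PySem.List.map_fst_enumerate]
  have hsplit : PySem.List.pyRange 0 (0 + (ps.length : Int)) 1
      = PySem.List.pyRange 0 (i : Int) 1 ++ PySem.List.pyRange (i : Int) (ps.length : Int) 1 := by
    rw [zero_add]
    exact PySem.List.pyRange_one_append 0 (i : Int) (ps.length : Int)
      (by exact_mod_cast Int.natCast_nonneg i) (by exact_mod_cast h)
  rw [hsplit]
  have hlen : (PySem.List.pyRange 0 (i : Int) 1).length = i := by
    simp [PySem.List.length_pyRange_one]
  exact List.drop_left' hlen

theorem pvEnum_drop_cons (ps : List Int) (i : Nat) (h : i < ps.length) :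
    (PySem.List.enumerate ps 0).drop i
      = ((i : Int), ps[i]) :: (PySem.List.enumerate ps 0).drop (i + 1) := by
  have hlen : i < (PySem.List.enumerate ps 0).length := by
    simpa [PySem.List.length_enumerate] using h
  rw [List.drop_eq_getElem_cons hlen, pvEnum_getElem ps i h]

-- main simulation: A's outer loop from index i = B's loop on the values of the unused pairs from i on
theorem pvOuter_eq (capacidad : Int) (ps : List Int) :
    ∀ (k i : Nat), i + k = ps.length → ∀ (u : List Int) (bolsas : List (List Int)),
    pvAOuter capacidad ps (ps.length : Int) (PySem.List.pyRange (i : Int) (ps.length : Int) 1) bolsas u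
      = pvBLoop capacidad ((pvFilt u ((PySem.List.enumerate ps 0).drop i)).map Prod.snd) bolsas := by
  intro k
  induction k with
  | zero =>
    intro i hi u bolsas
    have hi' : i = ps.length := by omega
    subst hi'
    rw [PySem.List.pyRange_one_eq_nil (le_refl _)]
    have : (PySem.List.enumerate ps 0).drop ps.length = [] := by
      apply List.drop_eq_nil_of_le
      simp [PySem.List.length_enumerate]
    rw [this]
    simp [pvAOuter, pvFilt, pvBLoop_nil]
  | succ k ih =>
    intro i hi u bolsas
    have hilt : i < ps.length := by omega
    have hcast : ((i : Int) : Int) < (ps.length : Int) := by exact_mod_cast hilt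
    rw [PySem.List.pyRange_one_cons hcast]
    have hi1 : ((i : Int) + 1) = ((i + 1 : Nat) : Int) := by push_cast; ring
    rw [hi1]
    have hdrop := pvEnum_drop_cons ps i hilt
    -- nodup / consistency facts for the suffix
    have hsub : ((PySem.List.enumerate ps 0).drop i).Sublist (PySem.List.enumerate ps 0) :=
      List.drop_sublist i _
    have hcons : ∀ q ∈ (PySem.List.enumerate ps 0).drop i, PySem.List.pyGetD ps q.1 0 = q.2 :=
      fun q hq => pvEnum_consistent ps q (hsub.mem hq)
    have hnd : (((PySem.List.enumerate ps 0).drop i).map Prod.fst).Nodup := by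
      rw [pvEnum_drop_map_fst ps i (le_of_lt hilt)]
      exact PySem.List.nodup_pyRange_one _ _
    simp only [pvAOuter]
    by_cases hu : ((i : Int) ∈ u)
    · have hcont : PySem.Set.contains u (i : Int) = true :=
        (PySem.Set.contains_iff (s := u) (x := (i : Int))).mpr hu
      rw [if_pos hcont]
      rw [ih (i + 1) (by omega) u bolsas]
      rw [hdrop, pvFilt_cons_of_mem u _ _ hu]
    · have hcont : ¬ (PySem.Set.contains u (i : Int) = true) := by
        intro hcc; exact hu ((PySem.Set.contains_iff (s := u) (x := (i : Int))).mp hcc)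
      rw [if_neg hcont]
      -- rewrite the inner loop via the simulation of one pass
      have hrange : PySem.List.pyRange (i : Int) (ps.length : Int) 1
          = ((PySem.List.enumerate ps 0).drop i).map Prod.fst :=
        (pvEnum_drop_map_fst ps i (le_of_lt hilt)).symm
      rw [hrange, pvAInner_eq ps _ u capacidad [] hcons hnd]
      set L' : List (Int × Int) := pvFilt u ((PySem.List.enumerate ps 0).drop (i + 1)) with hL'
      have hfiltc : pvFilt u ((PySem.List.enumerate ps 0).drop i) = ((i : Int), ps[i]) :: L' := by
        rw [hdrop, pvFilt_cons_of_not_mem u _ _ hu]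
      have hndL : ((pvFilt u ((PySem.List.enumerate ps 0).drop i)).map Prod.fst).Nodup := by
        have hs2 : (pvFilt u ((PySem.List.enumerate ps 0).drop i)).Sublist
            ((PySem.List.enumerate ps 0).drop i) := List.filter_sublist
        exact List.Nodup.sublist (hs2.map Prod.fst) hnd
      have hndL' : (((i : Int), ps[i]).1 :: L'.map Prod.fst).Nodup := by
        rw [hfiltc] at hndL; simpa using hndL
    -- B side: unfold one iteration of pvBLoop on the nonempty restantes
      rw [ih (i + 1) (by omega) _ _]
      rw [hfiltc]
      simp only [List.map_cons]
      rw [pvBLoop_cons]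
      have hpass := pvBPass_eq_greedyE (((i : Int), ps[i]) :: L') [] [] capacidad
      simp only [List.map_cons, List.nil_append] at hpass
      rw [hpass]
      rw [pvFilt_append, ← hL']
      have hinod : ∀ x ∈ L', x.1 ≠ (i : Int) := by
        intro x hx he
        have h0 := hndL'
        simp only [List.nodup_cons] at h0
        exact h0.1 (he ▸ List.mem_map_of_mem hx)
      by_cases hfit : ps[i] ≤ capacidad
      · have hg : pvGreedyE capacidad (((i : Int), ps[i]) :: L')
            = (((i : Int), ps[i]) :: (pvGreedyE (capacidad - ps[i]) L').1,
               (pvGreedyE (capacidad - ps[i]) L').2) := by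
          simp [pvGreedyE, hfit]
        rw [if_neg (by omega : ¬ ((ps[i] : Int) > capacidad))]
        simp only [hg, List.map_cons]
        rw [pvGreedyE_untaken (capacidad - ps[i]) L' (by simpa using hndL'.of_cons)]
        have hfc : L'.filter
              (fun q => !(decide (q.1 ∈ (i : Int) :: (pvGreedyE (capacidad - ps[i]) L').1.map Prod.fst)))
            = L'.filter
              (fun q => !(decide (q.1 ∈ (pvGreedyE (capacidad - ps[i]) L').1.map Prod.fst))) := by
          apply List.filter_congr
          intro x hx
          simp [List.mem_cons, hinod x hx]
        rw [hfc]
        simp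
      · have hg : pvGreedyE capacidad (((i : Int), ps[i]) :: L')
            = ((pvGreedyE capacidad L').1, ((i : Int), ps[i]) :: (pvGreedyE capacidad L').2) := by
          simp [pvGreedyE, hfit]
        rw [if_pos (by omega : (ps[i] : Int) > capacidad)]
        simp only [hg, List.map_cons, List.drop_succ_cons, List.drop_zero]
        rw [pvGreedyE_untaken capacidad L' (by simpa using hndL'.of_cons)]
        simp

-- ===== VERDICT (by name: the statement is the Claim_ definition above) =====
theorem distribuir_en_bolsas_spec : Claim_equal_distribuir_en_bolsas := by
  intro capacidad productos _
  unfold Spec_distribuir_en_bolsas distribuir_en_bolsas distribuir_en_bolsas_alt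
  by_cases hg : capacidad ≤ 0 ∨ productos = []
  · simp [hg]
  · rw [if_neg hg, if_neg hg]
    have h0 := pvOuter_eq capacidad (PySem.List.sorted productos (fun x => x) true)
      (PySem.List.sorted productos (fun x => x) true).length 0 (by omega) [] []
    simp only [Nat.cast_zero] at h0
    rw [List.drop_zero, pvFilt_nil_left, PySem.List.map_snd_enumerate] at h0
    exact h0
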